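-- pv_equiv track=rewrite | github.com/kodevadam/Pak | pak/c2pak/decl_mapper.py | _detect_enum_prefix
-- ===== SOURCE A (Python) =====
-- from typing import List, Dict, Optional, Tuple
--
-- def _detect_enum_prefix(values: List[Tuple[str, Optional[int]]]) -> str:
--     """Detect a common prefix shared by all enum value names.
--
--     E.g. ['DIR_UP', 'DIR_DOWN', 'DIR_LEFT', 'DIR_RIGHT'] → 'DIR_'
--     """
--     if not values:
--         return ''
--     names = [v[0] for v in values]
--     if len(names) == 1:
--         # single-value enum — don't strip
--         return ''
--     # Find common prefix up to and including the last '_'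
--     prefix = _common_prefix(names)
--     # Trim to the last underscore
--     idx = prefix.rfind('_')
--     if idx >= 0:
--         return prefix[:idx + 1]
--     return ''
--
-- def _common_prefix(strings: List[str]) -> str:
--     if not strings:
--         return ''
--     s = strings[0]
--     for other in strings[1:]:
--         while not other.startswith(s):
--             s = s[:-1]
--             if not s:
--                 return ''
--     return s
-- ===== SOURCE B (Python) =====
-- from typing import List, Dict, Optional, Tuple
--
-- def _detect_enum_prefix(values: List[Tuple[str, Optional[int]]]) -> str:
--     """Detect a common prefix shared by all enum value names (column-scan version)."""
--     if not values:
--         return ''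
--     names = [v[0] for v in values]
--     if len(names) == 1:
--         return ''
--     prefix = ''
--     for chars in zip(*names):
--         if all(c == chars[0] for c in chars):
--             prefix += chars[0]
--         else:
--             break
--     idx = prefix.rfind('_')
--     if idx >= 0:
--         return prefix[:idx + 1]
--     return ''
-- ===== Notes on version B (the rewrite author's own statement) =====
-- stated objective: idiomatic
-- what changed: Replaces the helper that repeatedly shrinks a candidate prefix against each name (pairwise while-loop) with an inlined column scan over zip(*names) that appends each character all names share and breaks at the first disagreement.
import Mathlib
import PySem

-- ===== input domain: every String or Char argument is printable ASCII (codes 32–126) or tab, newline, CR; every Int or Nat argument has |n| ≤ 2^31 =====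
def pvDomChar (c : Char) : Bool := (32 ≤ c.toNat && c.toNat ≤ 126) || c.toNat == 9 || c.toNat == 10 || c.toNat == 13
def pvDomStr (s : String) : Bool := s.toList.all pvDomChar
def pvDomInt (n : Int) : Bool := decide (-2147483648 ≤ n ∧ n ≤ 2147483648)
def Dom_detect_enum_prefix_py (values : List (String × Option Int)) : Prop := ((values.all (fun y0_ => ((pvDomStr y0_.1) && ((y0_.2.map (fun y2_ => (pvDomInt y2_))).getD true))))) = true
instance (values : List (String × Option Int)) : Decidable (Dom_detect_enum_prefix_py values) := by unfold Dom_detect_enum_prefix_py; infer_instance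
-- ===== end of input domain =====

-- B replaces A's pairwise shrink-until-prefix helper by an inlined column scan
-- (zip-style: walk character columns while all names agree); objective: more idiomatic.

-- ===== PORT A =====
-- the 'while not other.startswith(s): s = s[:-1]; if not s: return ""' inner loop of _common_prefix
def pvShrink (s other : List Char) : List Char :=
  if PySem.Chars.startswith other s then s
  else if h : s.dropLast = [] then []
  else pvShrink s.dropLast other
termination_by s.length
decreasing_by
  have hs : s ≠ [] := by intro e; rw [e] at h; simp at h
  have := List.length_pos_iff.mpr hs
  simp [List.length_dropLast]; omega

-- _common_prefix: '' for [], else fold the shrink loop over the rest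
-- (A's early 'return ""' when s becomes empty is the fold continuing with [], which pvShrink keeps at [])
def pvCommonPrefix (strings : List String) : List Char :=
  match strings with
  | [] => []
  | s :: rest => rest.foldl (fun acc other => pvShrink acc other.toList) s.toList

def detect_enum_prefix_py (values : List (String × Option Int)) : String :=
  if values = [] then "" else
  let names := values.map (fun v => v.1)
  if names.length = 1 then "" else
  let pre := pvCommonPrefix names
  let idx := PySem.Chars.rfind pre ['_']
  if 0 ≤ idx then String.ofList (PySem.Chars.slice pre none (some (idx + 1))) else ""

-- ===== PORT B =====
-- 'for chars in zip(*names): if all(c == chars[0] for c in chars): prefix += chars[0] else: break'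
-- one column per step; zip stops as soon as any name is exhausted
def pvColScan (names : List (List Char)) : List Char :=
  match names with
  | [] => []
  | n0 :: rest =>
    match n0 with
    | [] => []
    | c :: n0' =>
      if (rest.all (fun n => n.head? = some c)) then
        c :: pvColScan ((c :: n0') :: rest |>.map List.tail)
      else []
termination_by (match names with | [] => 0 | n0 :: _ => n0.length)
decreasing_by simp

def detect_enum_prefix_py_alt (values : List (String × Option Int)) : String :=
  if values = [] then "" else
  let names := values.map (fun v => v.1.toList)
  if names.length = 1 then "" else
  let pre := pvColScan names
  let idx := PySem.Chars.rfind pre ['_']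
  if 0 ≤ idx then String.ofList (PySem.Chars.slice pre none (some (idx + 1))) else ""

-- ===== PRECONDITION & SPEC =====
def Spec_detect_enum_prefix_py (values : List (String × Option Int)) (out : String) : Prop := out = detect_enum_prefix_py_alt values
instance (values : List (String × Option Int)) (out : String) : Decidable (Spec_detect_enum_prefix_py values out) := by unfold Spec_detect_enum_prefix_py; infer_instance

-- ===== CLAIM (what is proved, stated in full; the proofs are below) =====
def Claim_equal_detect_enum_prefix_py : Prop := ∀ (values : List (String × Option Int)), Dom_detect_enum_prefix_py values → Spec_detect_enum_prefix_py values (detect_enum_prefix_py values)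

-- ===== LEMMAS AND PROOFS =====

lemma prefix_dropLast {p s : List Char} (h : p <+: s) (hne : p ≠ s) : p <+: s.dropLast := by
  have hlt : p.length < s.length := lt_of_le_of_ne h.length_le (fun e => hne (h.eq_of_length e))
  rw [List.dropLast_eq_take, List.prefix_take_iff]
  exact ⟨h, by omega⟩

lemma pvShrink_spec (s other : List Char) :
    (pvShrink s other <+: s ∧ pvShrink s other <+: other) ∧
    (∀ p, p <+: s → p <+: other → p <+: pvShrink s other) := by
  induction s using pvShrink.induct other with
  | case1 s hsw =>
    rw [pvShrink, if_pos hsw]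
    exact ⟨⟨List.prefix_rfl, (PySem.Chars.startswith_iff other s).mp hsw⟩,
      fun p hp _ => hp⟩
  | case2 s hsw h =>
    rw [pvShrink, if_neg hsw, dif_pos h]
    refine ⟨⟨List.nil_prefix, List.nil_prefix⟩, fun p hp hpo => ?_⟩
    have hne : p ≠ s := by
      intro e; subst e; exact hsw ((PySem.Chars.startswith_iff other p).mpr hpo)
    have := prefix_dropLast hp hne
    rw [h] at this
    simpa using this
  | case3 s hsw h ih =>
    rw [pvShrink, if_neg hsw, dif_neg h]
    refine ⟨⟨ih.1.1.trans (List.dropLast_prefix s), ih.1.2⟩, fun p hp hpo => ?_⟩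
    have hne : p ≠ s := by
      intro e; subst e; exact hsw ((PySem.Chars.startswith_iff other p).mpr hpo)
    exact ih.2 p (prefix_dropLast hp hne) hpo

lemma pvFold_spec (n0 : List Char) (rest : List (List Char)) :
    (∀ n ∈ n0 :: rest, rest.foldl pvShrink n0 <+: n) ∧
    (∀ p, (∀ n ∈ n0 :: rest, p <+: n) → p <+: rest.foldl pvShrink n0) := by
  induction rest generalizing n0 with
  | nil => exact ⟨by simp, fun p hp => hp n0 (by simp)⟩
  | cons o rest ih =>
    obtain ⟨ihc, ihm⟩ := ih (pvShrink n0 o)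
    constructor
    · intro n hn
      simp only [List.foldl_cons]
      rcases List.mem_cons.mp hn with rfl | hn
      · exact (ihc _ (by simp)).trans (pvShrink_spec n o).1.1
      rcases List.mem_cons.mp hn with rfl | hn
      · exact (ihc _ (by simp)).trans (pvShrink_spec n0 n).1.2
      · exact ihc _ (by simp [hn])
    · intro p hp
      simp only [List.foldl_cons]
      refine ihm p ?_
      intro n hn
      rcases List.mem_cons.mp hn with rfl | hn
      · exact (pvShrink_spec n0 o).2 p (hp n0 (by simp)) (hp o (by simp))
      · exact hp n (by simp [hn])

lemma pvColScan_common (names : List (List Char)) : ∀ n ∈ names, pvColScan names <+: n := by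
  induction names using pvColScan.induct with
  | case1 => simp
  | case2 rest => intro n hn; rw [pvColScan]; exact List.nil_prefix
  | case3 rest c n0' hall ih =>
    intro n hn
    rw [pvColScan, if_pos hall]
    rcases List.mem_cons.mp hn with rfl | hn2
    · exact List.cons_prefix_cons.mpr ⟨rfl, ih _ (by simp)⟩
    · have hh := List.all_eq_true.mp hall n hn2
      simp only [decide_eq_true_eq] at hh
      cases n with
      | nil => simp at hh
      | cons d m =>
        have hd : d = c := by simpa using hh
        subst hd
        refine List.cons_prefix_cons.mpr ⟨rfl, ih m ?_⟩
        simp only [List.map_cons, List.tail_cons, List.mem_cons, List.mem_map]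
        exact Or.inr ⟨d :: m, hn2, rfl⟩
  | case4 rest c n0' hall =>
    intro n hn; rw [pvColScan, if_neg hall]; exact List.nil_prefix

lemma pvColScan_max (p : List Char) : ∀ names : List (List Char), names ≠ [] →
    (∀ n ∈ names, p <+: n) → p <+: pvColScan names := by
  induction p with
  | nil => intro _ _ _; exact List.nil_prefix
  | cons c p' ih =>
    intro names hne hp
    obtain ⟨n0, rest, rfl⟩ := List.exists_cons_of_ne_nil hne
    cases n0 with
    | nil => have := hp [] (by simp); simp at this
    | cons c0 n0' =>
      obtain ⟨rfl, hp0⟩ := List.cons_prefix_cons.mp (hp (c0 :: n0') (List.mem_cons_self ..))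
      have hall : (rest.all fun n => decide (n.head? = some c)) = true := by
        simp only [List.all_eq_true, decide_eq_true_eq]
        intro n hn
        cases n with
        | nil => have := hp [] (List.mem_cons_of_mem _ hn); simp at this
        | cons d m =>
          have := (List.cons_prefix_cons.mp (hp (d :: m) (List.mem_cons_of_mem _ hn))).1
          simp [this]
      rw [pvColScan, if_pos hall]
      refine List.cons_prefix_cons.mpr ⟨rfl, ih _ (by simp) ?_⟩
      intro n hn
      simp only [List.map_cons, List.tail_cons, List.mem_cons, List.mem_map] at hn
      rcases hn with rfl | ⟨m, hm, rfl⟩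
      · exact hp0
      · obtain ⟨t', ht'⟩ := hp m (List.mem_cons_of_mem _ hm)
        cases m with
        | nil => simp at ht'
        | cons d m' => exact ⟨t', by simpa using congrArg List.tail ht'⟩

lemma prefix_antisymm {p q : List Char} (h : p <+: q) (h2 : q <+: p) : p = q :=
  h.eq_of_length (le_antisymm h.length_le h2.length_le)

lemma colScan_eq_fold (n0 : List Char) (rest : List (List Char)) :
    pvColScan (n0 :: rest) = rest.foldl pvShrink n0 := by
  apply prefix_antisymm
  · exact (pvFold_spec n0 rest).2 _ (pvColScan_common _)
  · exact pvColScan_max _ _ (by simp) (pvFold_spec n0 rest).1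

-- ===== VERDICT (by name: the statement is the Claim_ definition above) =====
theorem detect_enum_prefix_py_spec : Claim_equal_detect_enum_prefix_py := by
  intro values _
  unfold Spec_detect_enum_prefix_py detect_enum_prefix_py detect_enum_prefix_py_alt
  cases values with
  | nil => simp
  | cons v vs =>
    simp only [if_neg (List.cons_ne_nil v vs), List.length_map]
    by_cases h1 : (v :: vs).length = 1
    · simp [h1]
    · simp only [if_neg h1]
      have he : pvCommonPrefix ((v :: vs).map (fun v => v.1))
          = pvColScan ((v :: vs).map (fun v => v.1.toList)) := by
        simp only [List.map_cons, pvCommonPrefix, colScan_eq_fold, List.foldl_map]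
      rw [he]
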